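-- pv_equiv track=rewrite | github.com/aleyoshimatsu/projects | jogo_nim.py | estrategia_vencedora
-- ===== SOURCE A (Python) =====
-- def estrategia_vencedora(n, m):
--     numero = 0
--     aux = 1
--     encontrou = False
--     while aux < m and not encontrou:
--         pecas_deixadas = n - aux
--         if pecas_deixadas != 1:
--             if (pecas_deixadas % (m + 1)) == 0:
--                 encontrou = True
--                 numero = aux
--         aux += 1
--
--     if not encontrou:
--         numero = m
--
--     return numero
-- ===== SOURCE B (Python) =====
-- def estrategia_vencedora(n, m):
--     # O(1) closed form: the loop's first hit is aux = n % (m+1), if it lies in [1, m-1]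
--     # and does not leave exactly one piece; otherwise the answer is m.
--     if m <= 1:
--         return m
--     r = n % (m + 1)
--     return r if 1 <= r < m and n - r != 1 else m
-- ===== Notes on version B (the rewrite author's own statement) =====
-- stated objective: faster
-- what changed: Replaces A's linear scan over aux=1..m-1 with direct modular arithmetic: the unique candidate move is n % (m+1), checked against the bounds and the leave-one-piece skip.
import Mathlib
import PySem

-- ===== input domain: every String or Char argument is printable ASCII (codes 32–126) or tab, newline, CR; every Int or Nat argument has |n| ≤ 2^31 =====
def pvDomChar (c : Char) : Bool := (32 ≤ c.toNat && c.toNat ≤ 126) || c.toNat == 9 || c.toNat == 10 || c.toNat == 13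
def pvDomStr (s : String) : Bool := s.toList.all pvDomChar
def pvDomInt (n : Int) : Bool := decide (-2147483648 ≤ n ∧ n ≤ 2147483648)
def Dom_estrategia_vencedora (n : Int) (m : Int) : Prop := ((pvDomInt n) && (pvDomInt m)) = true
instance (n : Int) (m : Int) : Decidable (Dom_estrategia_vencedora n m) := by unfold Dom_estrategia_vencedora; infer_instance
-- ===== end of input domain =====

-- B replaces A's linear scan with O(1) modular arithmetic; equal on all inputs (A is total).

-- ===== PORT A =====
-- the while loop of A: returns the found aux, or m if the loop ends without finding one
def evLoop (n : Int) (m : Int) (aux : Int) : Int :=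
  if _h : aux < m then
    let pecas := n - aux
    if pecas ≠ 1 ∧ PySem.Int.mod pecas (m + 1) = 0 then aux
    else evLoop n m (aux + 1)
  else m
termination_by (m - aux).toNat
decreasing_by omega

def estrategia_vencedora (n : Int) (m : Int) : Int := evLoop n m 1

-- ===== PORT B =====
def estrategia_vencedora_alt (n : Int) (m : Int) : Int :=
  if m ≤ 1 then m
  else
    let r := PySem.Int.mod n (m + 1)
    if 1 ≤ r ∧ r < m ∧ n - r ≠ 1 then r else m

-- ===== PRECONDITION & SPEC =====
def Spec_estrategia_vencedora (n : Int) (m : Int) (out : Int) : Prop := out = estrategia_vencedora_alt n m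
instance (n : Int) (m : Int) (out : Int) : Decidable (Spec_estrategia_vencedora n m out) := by unfold Spec_estrategia_vencedora; infer_instance

-- ===== CLAIM (what is proved, stated in full; the proofs are below) =====
def Claim_equal_estrategia_vencedora : Prop := ∀ (n : Int) (m : Int), Dom_estrategia_vencedora n m → Spec_estrategia_vencedora n m (estrategia_vencedora n m)

-- ===== LEMMAS AND PROOFS =====

-- loop characterisation: for 1 ≤ aux and 0 < m, the loop returns r = n % (m+1)
-- iff aux ≤ r < m and n - r ≠ 1, else m
theorem evLoop_eq (n m : Int) (hm : 0 < m) (aux : Int) (ha : 1 ≤ aux) :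
    evLoop n m aux =
      (if aux ≤ n % (m + 1) ∧ n % (m + 1) < m ∧ n - n % (m + 1) ≠ 1
       then n % (m + 1) else m) := by
  set r := n % (m + 1) with hr
  have hb : (0:Int) < m + 1 := by omega
  induction hn : (m - aux).toNat generalizing aux with
  | zero =>
    have hge : ¬ aux < m := by omega
    rw [evLoop]
    simp only [hge, dite_false]
    have : ¬ (aux ≤ r ∧ r < m ∧ n - r ≠ 1) := by omega
    simp [this]
  | succ k ih =>
    have hlt : aux < m := by omega
    rw [evLoop]
    simp only [hlt, dite_true]
    have hmod : PySem.Int.mod (n - aux) (m + 1) = (n - aux) % (m + 1) :=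
      PySem.Int.mod_eq_emod_of_pos hb
    have hauxmod : aux % (m + 1) = aux := Int.emod_eq_of_lt (by omega) (by omega)
    have hdiv : (n - aux) % (m + 1) = 0 ↔ r = aux := by
      rw [EuclideanDomain.mod_eq_zero, ← Int.modEq_iff_dvd]
      show aux % (m + 1) = n % (m + 1) ↔ r = aux
      rw [hauxmod, ← hr]
      exact eq_comm
    by_cases hfound : n - aux ≠ 1 ∧ PySem.Int.mod (n - aux) (m + 1) = 0
    · rw [if_pos hfound]
      have hra : r = aux := hdiv.mp (hmod ▸ hfound.2)
      have : aux ≤ r ∧ r < m ∧ n - r ≠ 1 := by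
        refine ⟨by omega, by omega, ?_⟩
        rw [hra]; exact hfound.1
      rw [if_pos this, hra]
    · simp only [hfound, if_false]
      rw [ih (aux + 1) (by omega) (by omega)]
      rw [hmod] at hfound
      by_cases hc : aux + 1 ≤ r ∧ r < m ∧ n - r ≠ 1
      · have : aux ≤ r ∧ r < m ∧ n - r ≠ 1 := ⟨by omega, hc.2⟩
        rw [if_pos hc, if_pos this]
      · have : ¬ (aux ≤ r ∧ r < m ∧ n - r ≠ 1) := by
          intro ⟨h1, h2, h3⟩
          have hra : r = aux := by omega
          exact hfound ⟨by rw [← hra]; exact h3, hdiv.mpr hra⟩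
        have hc' : ¬ (aux + 1 ≤ r ∧ r < m ∧ n - r ≠ 1) := hc
        rw [if_neg hc', if_neg this]

-- ===== VERDICT (by name: the statement is the Claim_ definition above) =====
theorem estrategia_vencedora_spec : Claim_equal_estrategia_vencedora := by
  intro n m _
  unfold Spec_estrategia_vencedora estrategia_vencedora estrategia_vencedora_alt
  by_cases hm : m ≤ 1
  · rw [evLoop]
    have : ¬ (1 < m) := by omega
    simp [this, hm]
  · have hm' : 0 < m := by omega
    rw [evLoop_eq n m hm' 1 le_rfl]
    have hmod : PySem.Int.mod n (m + 1) = n % (m + 1) :=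
      PySem.Int.mod_eq_emod_of_pos (by omega)
    simp [hm, hmod]
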